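-- pv_equiv track=rewrite | github.com/JuanCS-Dev/V-rtice | backend/services/system_architect_service/analyzers/redundancy_detector.py | _group_similar_services
-- ===== SOURCE A (Python) =====
-- from typing import Dict, Any, List
--
-- def _group_similar_services(
--
--     services: Dict[str, Dict[str, Any]]
-- ) -> Dict[str, List[str]]:
--     """Group services by functional similarity."""
--     groups = {}
--
--     # Group by common keywords
--     keywords = ["osint", "intel", "threat", "immune", "narrative"]
--
--     for keyword in keywords:
--         matching = [
--             name for name in services
--             if keyword in name.lower()
--         ]
--         if len(matching) > 1:
--             groups[keyword] = matching
--
--     return groups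
-- ===== SOURCE B (Python) =====
-- def _group_similar_services(services):
--     """Group services by functional similarity.
--
--     Multi-pattern scan: instead of testing `keyword in name` per keyword,
--     each lowercased name is scanned position by position; a first-character
--     index maps the character at the current position to the candidate
--     keywords, which are then matched in place with startswith.  Buckets per
--     keyword are filled in one pass over the services; keyword groups with
--     more than one member form the result, in keyword order.
--     """
--     keywords = ["osint", "intel", "threat", "immune", "narrative"]
--     by_first = {}
--     for kw in keywords:
--         by_first.setdefault(kw[0], []).append(kw)
--     buckets = {kw: [] for kw in keywords}
--     for name in services:
--         low = name.lower()
--         found = set()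
--         for i, ch in enumerate(low):
--             for kw in by_first.get(ch, []):
--                 if kw not in found and low.startswith(kw, i):
--                     found.add(kw)
--         for kw in keywords:
--             if kw in found:
--                 buckets[kw].append(name)
--     groups = {}
--     for kw, b in buckets.items():
--         if len(b) > 1:
--             groups[kw] = b
--     return groups
-- ===== Notes on version B (the rewrite author's own statement) =====
-- stated objective: alternative
-- what changed: Replaces A's per-keyword `keyword in name.lower()` scans of the whole services dict by a single pass that runs a multi-pattern positional scan over each lowercased name (a first-character index dispatches to candidate keywords, matched with startswith) and fills per-keyword buckets, then assembles groups with more than one member in keyword order.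
import Mathlib
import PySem

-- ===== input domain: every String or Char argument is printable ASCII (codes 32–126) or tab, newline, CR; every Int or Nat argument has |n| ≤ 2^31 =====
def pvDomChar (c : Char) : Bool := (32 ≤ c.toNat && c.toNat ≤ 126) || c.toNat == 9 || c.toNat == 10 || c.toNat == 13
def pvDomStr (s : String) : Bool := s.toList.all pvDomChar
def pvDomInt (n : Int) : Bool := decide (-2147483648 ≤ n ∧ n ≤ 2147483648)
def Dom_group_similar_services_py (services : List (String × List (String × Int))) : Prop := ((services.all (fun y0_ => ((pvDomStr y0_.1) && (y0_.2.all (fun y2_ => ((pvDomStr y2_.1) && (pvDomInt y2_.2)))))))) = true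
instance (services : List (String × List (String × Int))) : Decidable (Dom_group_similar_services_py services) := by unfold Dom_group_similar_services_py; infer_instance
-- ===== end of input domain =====

-- B replaces A's per-keyword `keyword in name.lower()` scans of the services by one pass
-- that scans each lowercased name position by position with a first-character keyword
-- index and startswith, filling per-keyword buckets ("alternative").

-- ===== PORT A =====
-- the fixed keyword list of A (and B)
def gssKeywords : List String := ["osint", "intel", "threat", "immune", "narrative"]

def group_similar_services_py (services : List (String × List (String × Int))) : List (String × List String) :=
  let groups : PySem.Dict String (List String) := PySem.Dict.empty
  let groups := gssKeywords.foldl (fun groups keyword =>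
    let matching := (services.map Prod.fst).filter
      (fun name => PySem.Str.isIn keyword (PySem.Str.lower name))
    if matching.length > 1 then groups.insert keyword matching else groups) groups
  groups.items

-- ===== PORT B =====
-- by_first.setdefault(kw[0], []).append(kw)  ported as Dict.modify; kw[0] is exact
-- (pyGet? never fails) since every keyword in the literal list is nonempty
def gssByFirst : PySem.Dict Char (List String) :=
  gssKeywords.foldl
    (fun d kw => d.modify ((PySem.Str.pyGet? kw 0).getD ' ') [] (· ++ [kw]))
    PySem.Dict.empty

-- the inner positional scan over one lowercased name; Python's low.startswith(kw, i)
-- is ported by hand as startswith on low.drop i — exact because enumerate's indices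
-- satisfy 0 ≤ i ≤ len(low)
def gssScan (low : List Char) : PySem.Set String :=
  (PySem.List.enumerate low).foldl (fun found p =>
    (gssByFirst.getD p.2 []).foldl (fun found kw =>
      if !(PySem.Set.contains found kw) && PySem.Chars.startswith (low.drop p.1.toNat) kw.toList
      then PySem.Set.add found kw else found) found) PySem.Set.empty

def group_similar_services_py_alt (services : List (String × List (String × Int))) : List (String × List String) :=
  let buckets : PySem.Dict String (List String) :=
    gssKeywords.foldl (fun d kw => d.insert kw []) PySem.Dict.empty
  let buckets := services.foldl (fun buckets p =>
    let found := gssScan (PySem.Str.lower p.1).toList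
    gssKeywords.foldl (fun b kw =>
      -- buckets[kw].append(name): kw is always a key of buckets, so no KeyError
      if PySem.Set.contains found kw then b.modify kw [] (· ++ [p.1]) else b) buckets) buckets
  let groups := buckets.items.foldl (fun g kb =>
    if kb.2.length > 1 then g.insert kb.1 kb.2 else g)
    (PySem.Dict.empty : PySem.Dict String (List String))
  groups.items

-- ===== PRECONDITION & SPEC =====
def Spec_group_similar_services_py (services : List (String × List (String × Int))) (out : List (String × List String)) : Prop := out = group_similar_services_py_alt services
instance (services : List (String × List (String × Int))) (out : List (String × List String)) : Decidable (Spec_group_similar_services_py services out) := by unfold Spec_group_similar_services_py; infer_instance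

-- ===== CLAIM (what is proved, stated in full; the proofs are below) =====
def Claim_equal_group_similar_services_py : Prop := ∀ (services : List (String × List (String × Int))), Dom_group_similar_services_py services → Spec_group_similar_services_py services (group_similar_services_py services)

-- ===== LEMMAS AND PROOFS =====

-- names whose lowercased form contains keyword k (A's matching list)
def gssMatching (services : List (String × List (String × Int))) (k : String) : List String :=
  (services.map Prod.fst).filter (fun name => PySem.Str.isIn k (PySem.Str.lower name))

lemma gssByFirst_getD (c : Char) : gssByFirst.getD c [] =
    if c = 'o' then ["osint"] else if c = 'i' then ["intel", "immune"]
    else if c = 't' then ["threat"] else if c = 'n' then ["narrative"] else [] := by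
  have h : gssByFirst = PySem.Dict.mk [('o', ["osint"]), ('i', ["intel", "immune"]),
      ('t', ["threat"]), ('n', ["narrative"])] := by decide
  rw [h]
  by_cases h1 : c = 'o' <;> by_cases h2 : c = 'i' <;> by_cases h3 : c = 't' <;> by_cases h4 : c = 'n' <;>
    subst_vars <;>
    simp_all [PySem.Dict.getD_eq_get?_getD, Ne.symm, PySem.Dict.get?]
lemma gss_mem_byFirst (kw : String) (hkw : kw ∈ gssKeywords) (c : Char) :
    kw ∈ gssByFirst.getD c [] ↔ kw.toList.head? = some c := by
  rw [gssByFirst_getD]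
  fin_cases hkw <;> split_ifs <;> simp_all <;> exact fun h => ‹¬_› h.symm

lemma gss_scan_inner (P : String → Bool) (k : String) (cands : List String) :
    ∀ s : PySem.Set String,
    PySem.Set.contains (cands.foldl (fun s kw =>
        if !(PySem.Set.contains s kw) && P kw then PySem.Set.add s kw else s) s) k
      = (PySem.Set.contains s k || (decide (k ∈ cands) && P k)) := by
  induction cands with
  | nil => intro s; simp
  | cons c t ih =>
    intro s
    rw [List.foldl_cons]
    by_cases hc : (!(PySem.Set.contains s c) && P c) = true
    · rw [if_pos hc, ih]
      simp only [Bool.and_eq_true, Bool.not_eq_true'] at hc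
      by_cases hk : k = c
      · subst hk
        simp_all [PySem.Set.contains_eq_listContains]
      · simp_all [PySem.Set.contains_eq_listContains]
    · rw [if_neg hc, ih]
      by_cases hk : k = c
      · subst hk
        simp only [Bool.and_eq_true, Bool.not_eq_true', not_and, Bool.not_eq_true] at hc
        simp_all [PySem.Set.contains_eq_listContains]
        by_cases hs : k ∈ s <;> simp_all
      · simp [hk]

lemma gss_scan_fold (low : List Char) (k : String) (l : List (Int × Char)) :
    ∀ s : PySem.Set String,
    PySem.Set.contains (l.foldl (fun found p =>
      (gssByFirst.getD p.2 []).foldl (fun found kw =>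
        if !(PySem.Set.contains found kw) && PySem.Chars.startswith (low.drop p.1.toNat) kw.toList
        then PySem.Set.add found kw else found) found) s) k
      = (PySem.Set.contains s k || l.any (fun p =>
          decide (k ∈ gssByFirst.getD p.2 []) &&
          PySem.Chars.startswith (low.drop p.1.toNat) k.toList)) := by
  induction l with
  | nil => intro s; simp
  | cons p t ih =>
    intro s
    rw [List.foldl_cons, ih, gss_scan_inner]
    simp [Bool.or_assoc]

lemma gss_scan_contains (low : List Char) (k : String) :
    PySem.Set.contains (gssScan low) k
      = (PySem.List.enumerate low).any (fun p =>
          decide (k ∈ gssByFirst.getD p.2 []) &&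
          PySem.Chars.startswith (low.drop p.1.toNat) k.toList) := by
  unfold gssScan
  rw [gss_scan_fold]
  simp [PySem.Set.contains_eq_listContains, PySem.Set.empty]

lemma gss_scan_eq_isIn (low : List Char) (kw : String) (hkw : kw ∈ gssKeywords) :
    PySem.Set.contains (gssScan low) kw = PySem.Chars.isIn kw.toList low := by
  have hne : kw.toList ≠ [] := by fin_cases hkw <;> decide
  rw [gss_scan_contains]
  rcases h : PySem.Chars.isIn kw.toList low with _ | _
  · -- isIn false: no position matches
    rw [PySem.Chars.isIn_eq_false_iff] at h
    simp only [List.any_eq_false]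
    intro p hp
    simp only [Bool.and_eq_true, decide_eq_true_eq, not_and]
    intro _ hsw
    exact absurd ((PySem.Chars.exists_prefix_drop_iff_isIn _ _).mp
      ⟨p.1.toNat, (PySem.Chars.startswith_iff _ _).mp hsw⟩)
      (by simp [PySem.Chars.isIn_iff_infix, h])
  · -- isIn true: some position matches
    have ⟨j, hj⟩ := (PySem.Chars.exists_prefix_drop_iff_isIn kw.toList low).mpr h
    obtain ⟨c, rest, hkl⟩ : ∃ c rest, kw.toList = c :: rest := by
      cases hcl : kw.toList with
      | nil => exact absurd hcl hne
      | cons c rest => exact ⟨c, rest, rfl⟩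
    have hjlen : j < low.length := by
      by_contra hge
      rw [List.drop_eq_nil_of_le (by omega)] at hj
      rw [hkl] at hj
      exact absurd (List.prefix_nil.mp hj) (by simp)
    have hgj : low[j] = c := by
      have h0 : (low.drop j)[0]? = some c := by
        rcases hj with ⟨t, ht⟩
        rw [← ht, hkl]; rfl
      rw [List.getElem?_drop] at h0
      have := List.getElem?_eq_getElem (l := low) (i := j + 0) (by omega)
      simp only [Nat.add_zero] at h0 this
      rw [this] at h0
      exact Option.some.inj h0
    simp only [List.any_eq_true]
    refine ⟨((j : Int), low[j]), ?_, ?_⟩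
    · rw [PySem.List.mem_enumerate_iff]
      exact ⟨j, hjlen, by simp⟩
    · simp only [Bool.and_eq_true, decide_eq_true_eq]
      constructor
      · rw [gss_mem_byFirst kw hkw]
        rw [hkl, hgj]; rfl
      · rw [PySem.Chars.startswith_iff]
        simpa using hj

lemma gss_items_foldl_insert_if (L : List (String × List String)) :
    ∀ d : PySem.Dict String (List String), (L.map Prod.fst).Nodup →
    (∀ p ∈ L, d.contains p.1 = false) →
    (L.foldl (fun g kb => if kb.2.length > 1 then g.insert kb.1 kb.2 else g) d).items
      = d.items ++ L.filter (fun kb => kb.2.length > 1) := by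
  induction L with
  | nil => intro d _ _; simp
  | cons kb t ih =>
    intro d hnd hnc
    simp only [List.map_cons, List.nodup_cons] at hnd
    by_cases h : kb.2.length > 1
    · have hrest : ∀ p ∈ t, (d.insert kb.1 kb.2).contains p.1 = false := by
        intro p hp
        rw [PySem.Dict.contains_insert]
        have hne : p.1 ≠ kb.1 := fun he => hnd.1 (he ▸ (List.mem_map_of_mem hp))
        simp [hne, hnc p (List.mem_cons_of_mem _ hp)]
      rw [List.foldl_cons, if_pos h, ih _ hnd.2 hrest,
        PySem.Dict.items_insert_of_not_contains _ _ (hnc kb List.mem_cons_self),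
        List.filter_cons_of_pos (by simpa using h)]
      simp
    · rw [List.foldl_cons, if_neg h, ih _ hnd.2 (fun p hp => hnc p (List.mem_cons_of_mem _ hp)),
        List.filter_cons_of_neg (by simpa using h)]

lemma gss_foldl_modify_if_getD (c : String → Bool) (f : List String → List String)
    (kw : String) (ks : List String) :
    ∀ d : PySem.Dict String (List String), ks.Nodup →
    (ks.foldl (fun b k => if c k then b.modify k [] f else b) d).getD kw []
      = if kw ∈ ks ∧ c kw = true then f (d.getD kw []) else d.getD kw [] := by
  induction ks with
  | nil => intro d _; simp
  | cons k t ih =>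
    intro d hnd
    simp only [List.nodup_cons] at hnd
    rw [List.foldl_cons, ih _ hnd.2]
    by_cases hk : kw = k
    · subst hk
      by_cases hc : c kw = true
      · simp [hc, hnd.1, PySem.Dict.getD_modify_self]
      · simp [hc, hnd.1]
    · by_cases hc : c k = true
      · simp only [hc, if_true]
        rw [PySem.Dict.getD_modify_of_ne]
        · by_cases hm : kw ∈ t <;> simp [hm, hk]
        · exact hk
      · simp only [hc]
        by_cases hm : kw ∈ t <;> simp [hm, hk]

lemma gss_keys_inner (c : String → Bool)
    (f : List String → List String) (ks : List String) :
    ∀ d : PySem.Dict String (List String), (∀ k0 ∈ ks, d.contains k0 = true) →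
    (ks.foldl (fun b k => if c k then b.modify k [] f else b) d).keys = d.keys ∧
    (∀ x, (ks.foldl (fun b k => if c k then b.modify k [] f else b) d).contains x = d.contains x) := by
  induction ks with
  | nil => intro d _; exact ⟨rfl, fun _ => rfl⟩
  | cons k t ih =>
    intro d hc0
    by_cases hc : c k = true
    · have hck : d.contains k = true := hc0 k List.mem_cons_self
      have hkeys : (d.modify k [] f).keys = d.keys := by
        rw [PySem.Dict.keys_modify, PySem.Dict.keys_insert_of_contains (h := hck)]
      have hcont : ∀ x, (d.modify k [] f).contains x = d.contains x := by
        intro x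
        rw [PySem.Dict.contains_modify]
        by_cases hx : x = k <;> simp [hx, hck]
      have ih' := ih (d.modify k [] f)
        (fun k0 hk0 => by rw [hcont k0]; exact hc0 k0 (List.mem_cons_of_mem _ hk0))
      refine ⟨?_, fun x => ?_⟩
      · rw [List.foldl_cons, if_pos hc, ih'.1, hkeys]
      · rw [List.foldl_cons, if_pos hc, ih'.2 x, hcont x]
    · have ih' := ih d (fun k0 hk0 => hc0 k0 (List.mem_cons_of_mem _ hk0))
      refine ⟨?_, fun x => ?_⟩
      · rw [List.foldl_cons, if_neg hc, ih'.1]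
      · rw [List.foldl_cons, if_neg hc, ih'.2 x]

lemma gss_keys_bucket_fold (l : List (String × List (String × Int))) :
    ∀ d : PySem.Dict String (List String), (∀ k0 ∈ gssKeywords, d.contains k0 = true) →
    (l.foldl (fun buckets p =>
      gssKeywords.foldl (fun b kw =>
        if PySem.Set.contains (gssScan (PySem.Str.lower p.1).toList) kw
        then b.modify kw [] (· ++ [p.1]) else b) buckets) d).keys = d.keys := by
  induction l with
  | nil => intro d _; rfl
  | cons p t ih =>
    intro d hc0
    rw [List.foldl_cons]
    have h := gss_keys_inner
      (fun kw => PySem.Set.contains (gssScan (PySem.Str.lower p.1).toList) kw)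
      (· ++ [p.1]) gssKeywords d hc0
    rw [ih _ (fun k0 hk0 => by rw [h.2 k0]; exact hc0 k0 hk0), h.1]

lemma gss_bucket_fold_getD (kw : String) (hkw : kw ∈ gssKeywords)
    (l : List (String × List (String × Int))) :
    ∀ d : PySem.Dict String (List String),
    (l.foldl (fun buckets p =>
      gssKeywords.foldl (fun b k =>
        if PySem.Set.contains (gssScan (PySem.Str.lower p.1).toList) k
        then b.modify k [] (· ++ [p.1]) else b) buckets) d).getD kw []
      = d.getD kw [] ++ gssMatching l kw := by
  induction l with
  | nil => intro d; simp [gssMatching]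
  | cons p t ih =>
    intro d
    rw [List.foldl_cons, ih,
      gss_foldl_modify_if_getD _ _ kw gssKeywords d (by decide),
      gss_scan_eq_isIn _ kw hkw]
    simp only [gssMatching, List.map_cons, PySem.Str.isIn_eq, PySem.Str.toList_lower]
    by_cases hc : PySem.Chars.isIn kw.toList (PySem.Chars.lower p.1.toList) = true
    · rw [List.filter_cons_of_pos (by simpa using hc)]
      simp [hkw, hc]
    · rw [List.filter_cons_of_neg (by simpa using hc)]
      simp [hkw, hc]

lemma gss_L_fst_nodup (services : List (String × List (String × Int))) :
    ((gssKeywords.map (fun k => (k, gssMatching services k))).map Prod.fst).Nodup := by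
  rw [List.map_map]
  exact List.nodup_map_iff_inj_on (by decide) |>.mpr (fun a _ b _ h => h)

lemma gss_A_items (services : List (String × List (String × Int))) :
    group_similar_services_py services
      = (gssKeywords.map (fun k => (k, gssMatching services k))).filter
          (fun kb => kb.2.length > 1) := by
  unfold group_similar_services_py
  simp only []
  rw [show (gssKeywords.foldl (fun groups keyword =>
      let matching := (services.map Prod.fst).filter
        (fun name => PySem.Str.isIn keyword (PySem.Str.lower name))
      if matching.length > 1 then groups.insert keyword matching else groups)
      (PySem.Dict.empty : PySem.Dict String (List String)))
    = (gssKeywords.map (fun k => (k, gssMatching services k))).foldl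
        (fun g kb => if kb.2.length > 1 then g.insert kb.1 kb.2 else g) PySem.Dict.empty
    from (List.foldl_map
      (f := fun k => (k, gssMatching services k))
      (g := fun g kb => if kb.2.length > 1 then g.insert kb.1 kb.2 else g)
      (l := gssKeywords) (init := PySem.Dict.empty)).symm]
  rw [gss_items_foldl_insert_if _ _ (gss_L_fst_nodup services)
    (fun p _ => PySem.Dict.contains_empty p.1)]
  rfl

lemma gss_B_items (services : List (String × List (String × Int))) :
    group_similar_services_py_alt services
      = (gssKeywords.map (fun k => (k, gssMatching services k))).filter
          (fun kb => kb.2.length > 1) := by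
  unfold group_similar_services_py_alt
  simp only []
  have hb0c : ∀ k0 ∈ gssKeywords,
      (gssKeywords.foldl (fun d kw => d.insert kw [])
        (PySem.Dict.empty : PySem.Dict String (List String))).contains k0 = true := by decide
  have hkeys : (services.foldl (fun buckets p =>
      gssKeywords.foldl (fun b kw =>
        if PySem.Set.contains (gssScan (PySem.Str.lower p.1).toList) kw
        then b.modify kw [] (· ++ [p.1]) else b) buckets)
      (gssKeywords.foldl (fun d kw => d.insert kw []) PySem.Dict.empty)).keys = gssKeywords := by
    rw [gss_keys_bucket_fold services _ hb0c]
    decide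
  have hitems : (services.foldl (fun buckets p =>
      gssKeywords.foldl (fun b kw =>
        if PySem.Set.contains (gssScan (PySem.Str.lower p.1).toList) kw
        then b.modify kw [] (· ++ [p.1]) else b) buckets)
      (gssKeywords.foldl (fun d kw => d.insert kw []) PySem.Dict.empty)).items
      = gssKeywords.map (fun k => (k, gssMatching services k)) := by
    rw [PySem.Dict.items_eq_map_keys _ (by rw [hkeys]; decide) [], hkeys]
    apply List.map_congr_left
    intro k hk
    rw [gss_bucket_fold_getD k hk services _]
    have h0 : (gssKeywords.foldl (fun d kw => d.insert kw [])
        (PySem.Dict.empty : PySem.Dict String (List String))).getD k [] = [] := by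
      fin_cases hk <;> decide
    rw [h0, List.nil_append]
  rw [hitems,
    gss_items_foldl_insert_if _ _ (gss_L_fst_nodup services)
      (fun p _ => PySem.Dict.contains_empty p.1)]
  rfl


-- ===== VERDICT (by name: the statement is the Claim_ definition above) =====
theorem group_similar_services_py_spec : Claim_equal_group_similar_services_py := by
  intro services _
  unfold Spec_group_similar_services_py
  rw [gss_A_items, gss_B_items]
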